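-- pv_equiv track=rewrite | github.com/ajnirp/binarysearch | monotonous-string-groups.py | solve
-- ===== SOURCE A (Python) =====
-- def solve(s):
--     if len(s) == 0:
--         return 0
--     state = 'uncertain'
--     stack = [s[0]]
--     groups = 1
--     for c in s[1:]:
--         if state == 'uncertain':
--             if c > stack[-1]:
--                 state = 'ascending'
--                 stack.append(c)
--             elif c < stack[-1]:
--                 state = 'descending'
--                 stack.append(c)
--             else:
--                 stack.append(c)
--         elif state == 'ascending':
--             if c > stack[-1]:
--                 stack.append(c)
--             elif c < stack[-1]:
--                 state = 'uncertain'
--                 groups += 1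
--                 stack = [c]
--             else:
--                 stack.append(c)
--         elif state == 'descending':
--             if c > stack[-1]:
--                 state = 'uncertain'
--                 groups += 1
--                 stack = [c]
--             elif c < stack[-1]:
--                 stack.append(c)
--             else:
--                 stack.append(c)
--     return groups
-- ===== SOURCE B (Python) =====
-- def solve(s):
--     if not s:
--         return 0
--     # Phase 1: nonzero adjacent comparison signs (equal chars are neutral).
--     signs = [1 if b > a else -1 for a, b in zip(s, s[1:]) if a != b]
--     # Phase 2: greedy scan over the signs; a reversal closes a group and
--     # resets the reference direction (the sign after a break starts fresh).
--     groups = 1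
--     prev = 0
--     for x in signs:
--         if prev and x != prev:
--             groups += 1
--             prev = 0
--         else:
--             prev = x
--     return groups
-- ===== Notes on version B (the rewrite author's own statement) =====
-- stated objective: simpler
-- what changed: Replaces A's one-pass state machine (three named string states plus a growing character stack) with two plain passes: first extract the list of nonzero adjacent comparison signs, then count group breaks over that sign list with a single resettable reference sign.
import Mathlib
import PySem

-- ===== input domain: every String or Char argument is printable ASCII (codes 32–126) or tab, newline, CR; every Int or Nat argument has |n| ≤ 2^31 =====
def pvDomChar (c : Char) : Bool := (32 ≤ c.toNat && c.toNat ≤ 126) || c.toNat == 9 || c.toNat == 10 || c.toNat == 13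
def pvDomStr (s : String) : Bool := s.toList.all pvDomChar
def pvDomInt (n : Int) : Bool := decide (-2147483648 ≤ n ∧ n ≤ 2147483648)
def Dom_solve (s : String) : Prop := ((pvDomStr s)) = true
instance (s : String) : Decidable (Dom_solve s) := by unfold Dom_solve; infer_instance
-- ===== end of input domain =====

-- B replaces A's stack-and-three-state machine by two passes: extract the nonzero
-- adjacent comparison signs, then count group breaks over that sign list (objective: simpler).

-- ===== PORT A =====
-- A's loop: state ∈ {"uncertain","ascending","descending"}, a stack of chars
-- (only its last element is ever read), a group counter.  stack[-1] is ported with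
-- PySem.List.pyGet?; the stack is never empty when it is read, so .getD ' ' is never hit.
def solveLoopA (st : String) (stack : List Char) (groups : Int) : List Char → Int
  | [] => groups
  | c :: rest =>
    let last := (PySem.List.pyGet? stack (-1)).getD ' '
    if st = "uncertain" then
      if last < c then solveLoopA "ascending" (stack ++ [c]) groups rest
      else if c < last then solveLoopA "descending" (stack ++ [c]) groups rest
      else solveLoopA st (stack ++ [c]) groups rest
    else if st = "ascending" then
      if last < c then solveLoopA st (stack ++ [c]) groups rest
      else if c < last then solveLoopA "uncertain" [c] (groups + 1) rest
      else solveLoopA st (stack ++ [c]) groups rest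
    else
      if last < c then solveLoopA "uncertain" [c] (groups + 1) rest
      else if c < last then solveLoopA st (stack ++ [c]) groups rest
      else solveLoopA st (stack ++ [c]) groups rest

def solve (s : String) : Int :=
  match s.toList with
  | [] => 0
  | c0 :: rest => solveLoopA "uncertain" [c0] 1 rest

-- ===== PORT B =====
-- Phase 1: signs of the strict adjacent comparisons (equal chars contribute nothing),
-- the comprehension over zip(s, s[1:]) transliterated as recursion on adjacent pairs.
def mkSigns : List Char → List Int
  | [] => []
  | [_] => []
  | a :: b :: rest =>
    (if a ≠ b then [if a < b then (1 : Int) else -1] else []) ++ mkSigns (b :: rest)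

-- Phase 2: greedy scan; prev = 0 encodes Python's falsy reference direction.
def solveLoopB (prev : Int) (groups : Int) : List Int → Int
  | [] => groups
  | x :: xs =>
    if prev ≠ 0 ∧ x ≠ prev then solveLoopB 0 (groups + 1) xs
    else solveLoopB x groups xs

def solve_alt (s : String) : Int :=
  match s.toList with
  | [] => 0
  | l => solveLoopB 0 1 (mkSigns l)

-- ===== PRECONDITION & SPEC =====
def Spec_solve (s : String) (out : Int) : Prop := out = solve_alt s
instance (s : String) (out : Int) : Decidable (Spec_solve s out) := by unfold Spec_solve; infer_instance

-- ===== CLAIM (what is proved, stated in full; the proofs are below) =====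
def Claim_equal_solve : Prop := ∀ (s : String), Dom_solve s → Spec_solve s (solve s)

-- ===== LEMMAS AND PROOFS =====

-- A's three states correspond to B's reference sign 0 / 1 / -1; the stack only
-- matters through its last element p, which is the left neighbour of the next char.
lemma loopA_eq_loopB (cs : List Char) :
    ∀ (p : Char) (stack : List Char) (g : Int),
      (PySem.List.pyGet? stack (-1)).getD ' ' = p →
      solveLoopA "uncertain" stack g cs = solveLoopB 0 g (mkSigns (p :: cs)) ∧
      solveLoopA "ascending" stack g cs = solveLoopB 1 g (mkSigns (p :: cs)) ∧
      solveLoopA "descending" stack g cs = solveLoopB (-1) g (mkSigns (p :: cs)) := by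
  induction cs with
  | nil =>
    intro p stack g _
    simp [solveLoopA, mkSigns, solveLoopB]
  | cons c rest ih =>
    intro p stack g hlast
    have hlast' : (PySem.List.pyGet? (stack ++ [c]) (-1)).getD ' ' = c := by
      simp [PySem.List.pyGet?_neg_one_append_singleton]
    have hsingle : (PySem.List.pyGet? [c] (-1)).getD ' ' = c := by
      simp [PySem.List.pyGet?_neg_one]
    rcases lt_trichotomy p c with hpc | hpc | hpc
    · have hne : p ≠ c := ne_of_lt hpc
      have hnlt : ¬ c < p := not_lt_of_gt hpc
      refine ⟨?_, ?_, ?_⟩ <;>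
        simp only [solveLoopA, hlast, if_neg hnlt, mkSigns, hne, if_pos hpc,
          ite_true, ne_eq, not_false_eq_true, List.cons_append, List.nil_append] <;>
        simp [solveLoopB, (ih c (stack ++ [c]) g hlast').2.1,
          (ih c [c] (g + 1) hsingle).1]
    · subst hpc
      have : ¬ p < p := lt_irrefl p
      refine ⟨?_, ?_, ?_⟩ <;>
        simp only [solveLoopA, hlast, if_neg this, mkSigns, ne_eq, not_true_eq_false, ite_false, List.nil_append] <;>
        [exact (ih p (stack ++ [p]) g hlast').1;
         exact (ih p (stack ++ [p]) g hlast').2.1;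
         exact (ih p (stack ++ [p]) g hlast').2.2]
    · have hne : p ≠ c := ne_of_gt hpc
      have hnlt : ¬ p < c := not_lt_of_gt hpc
      refine ⟨?_, ?_, ?_⟩ <;>
        simp only [solveLoopA, hlast, if_neg hnlt, if_pos hpc, mkSigns, hne, ne_eq,
          not_false_eq_true, ite_true, List.cons_append, List.nil_append] <;>
        simp [solveLoopB, (ih c (stack ++ [c]) g hlast').2.2,
          (ih c [c] (g + 1) hsingle).1]

-- ===== VERDICT (by name: the statement is the Claim_ definition above) =====
theorem solve_spec : Claim_equal_solve := by
  intro s _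
  unfold Spec_solve solve solve_alt
  cases h : s.toList with
  | nil => rfl
  | cons c0 rest =>
    exact (loopA_eq_loopB rest c0 [c0] 1 (by simp [PySem.List.pyGet?_neg_one])).1
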